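-- pv_equiv track=rewrite | github.com/pdhung3012/InvestigateNLPLDatasets | devItems/spocExtraction/combineCodeCommentGeneration/Step1_getIdentifierInformation.py | getTerminalValue
-- ===== SOURCE A (Python) =====
-- def getTerminalValue(startPointLine,startPointOffset,endPointLine,endPointOffset,arrCodes):
--     lstStr=[]
--     if startPointLine==endPointLine:
--         return arrCodes[startPointLine][startPointOffset:endPointOffset]
--     for i in range(startPointLine,endPointLine+1):
--
--         if i==startPointLine:
--             strAdd=arrCodes[i][startPointOffset:]
--             lstStr.append(strAdd)
--         elif i==endPointLine:
--             strAdd = arrCodes[i][:endPointOffset]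
--             lstStr.append(strAdd)
--         else:
--             strAdd = arrCodes[i]
--             lstStr.append(strAdd)
--     strReturn='\n'.join(lstStr)
--     return strReturn
-- ===== SOURCE B (Python) =====
-- def _clamp(off, n):
--     # absolute position of string offset `off` within a string of length n (Python slice clamping)
--     if off < 0:
--         off += n
--     return min(max(off, 0), n)
--
-- def getTerminalValue(startPointLine, startPointOffset, endPointLine, endPointOffset, arrCodes):
--     if startPointLine == endPointLine:
--         return arrCodes[startPointLine][startPointOffset:endPointOffset]
--     if startPointLine > endPointLine:
--         return ''
--     chunk = arrCodes[startPointLine:endPointLine + 1]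
--     joined = '\n'.join(chunk)
--     lo = _clamp(startPointOffset, len(chunk[0]))
--     hi = len(joined) - len(chunk[-1]) + _clamp(endPointOffset, len(chunk[-1]))
--     return joined[lo:hi]
-- ===== Notes on version B (the rewrite author's own statement) =====
-- stated objective: alternative
-- what changed: A trims each line inside a per-line loop with three-way branching and joins the trimmed pieces; B joins the untrimmed line range once and returns a single slice of the joined text, converting the two offsets to absolute character positions arithmetically (keeping A's single-line early return and adding an explicit empty-range guard).
-- outside the precondition, e.g. on getTerminalValue(0, 1, 0, 2, []): A raises IndexError, B raises IndexError; on getTerminalValue(-1, 0, 1, 1, ['ab', 'cd']): A returns 'cd\nab\nc', B returns 'c'; on getTerminalValue(0, 0, 3, 1, ['ab', 'cd']): A raises IndexError, B returns 'ab\nc'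
import Mathlib
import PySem

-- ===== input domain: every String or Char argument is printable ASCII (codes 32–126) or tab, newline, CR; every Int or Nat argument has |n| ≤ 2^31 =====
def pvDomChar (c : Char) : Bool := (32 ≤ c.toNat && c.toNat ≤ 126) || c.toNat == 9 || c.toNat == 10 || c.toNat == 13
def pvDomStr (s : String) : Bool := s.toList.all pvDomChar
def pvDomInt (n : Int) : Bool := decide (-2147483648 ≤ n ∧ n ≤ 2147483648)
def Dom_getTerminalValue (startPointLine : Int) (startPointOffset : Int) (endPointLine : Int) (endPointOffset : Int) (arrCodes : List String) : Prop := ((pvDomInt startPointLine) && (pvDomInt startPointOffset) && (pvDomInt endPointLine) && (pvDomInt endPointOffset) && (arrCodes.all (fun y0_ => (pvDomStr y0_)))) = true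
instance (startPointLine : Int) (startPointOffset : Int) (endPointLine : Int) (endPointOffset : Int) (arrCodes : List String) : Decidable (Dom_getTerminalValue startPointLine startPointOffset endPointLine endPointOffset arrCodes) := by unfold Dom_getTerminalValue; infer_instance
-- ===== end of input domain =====

-- B replaces A's per-line trim-and-collect loop by joining the untrimmed line range once and
-- taking a single slice of the joined text at arithmetically computed absolute character
-- positions (objective: alternative decomposition; same O(output) cost).
-- ===== PORT A =====
def getTerminalValue (startPointLine : Int) (startPointOffset : Int) (endPointLine : Int) (endPointOffset : Int) (arrCodes : List String) : String :=
  if startPointLine = endPointLine then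
    PySem.Str.slice ((PySem.List.pyGet? arrCodes startPointLine).getD "") (some startPointOffset) (some endPointOffset)
  else
    let lstStr : List String :=
      (PySem.List.pyRange startPointLine (endPointLine + 1) 1).foldl (fun acc i =>
        if i = startPointLine then
          acc ++ [PySem.Str.slice ((PySem.List.pyGet? arrCodes i).getD "") (some startPointOffset) none]
        else if i = endPointLine then
          acc ++ [PySem.Str.slice ((PySem.List.pyGet? arrCodes i).getD "") none (some endPointOffset)]
        else
          acc ++ [(PySem.List.pyGet? arrCodes i).getD ""]) []
    PySem.Str.join "\n" lstStr

-- ===== PORT B =====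
-- _clamp(off, n): absolute position of offset `off` in a string of length n (Python slice clamping)
def pvClamp (off : Int) (n : Int) : Int :=
  let t := if off < 0 then off + n else off
  min (max t 0) n

def getTerminalValue_alt (startPointLine : Int) (startPointOffset : Int) (endPointLine : Int) (endPointOffset : Int) (arrCodes : List String) : String :=
  if startPointLine = endPointLine then
    PySem.Str.slice ((PySem.List.pyGet? arrCodes startPointLine).getD "") (some startPointOffset) (some endPointOffset)
  else if endPointLine < startPointLine then ""
  else
    let chunk := PySem.List.slice arrCodes (some startPointLine) (some (endPointLine + 1))
    let joined := PySem.Str.join "\n" chunk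
    let lo := pvClamp startPointOffset (PySem.Str.len ((PySem.List.pyGet? chunk 0).getD ""))
    let hi := PySem.Str.len joined - PySem.Str.len ((PySem.List.pyGet? chunk (-1)).getD "")
                + pvClamp endPointOffset (PySem.Str.len ((PySem.List.pyGet? chunk (-1)).getD ""))
    PySem.Str.slice joined (some lo) (some hi)

-- ===== PRECONDITION & SPEC =====
-- Pre_ excludes (a) same-line extractions whose line index is out of range (A raises IndexError) and
-- (b) multi-line extractions whose start line is negative or whose end line is ≥ len(arrCodes):
-- there A either raises IndexError or, via Python's negative-index wraparound, reads lines from the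
-- end of the list — line numbers are nonnegative in the function's natural domain.
def Pre_getTerminalValue (startPointLine : Int) (startPointOffset : Int) (endPointLine : Int) (endPointOffset : Int) (arrCodes : List String) : Prop :=
  if startPointLine = endPointLine then PySem.Raise.InRange arrCodes.length startPointLine
  else endPointLine < startPointLine ∨ (0 ≤ startPointLine ∧ endPointLine < (arrCodes.length : Int))
instance (startPointLine : Int) (startPointOffset : Int) (endPointLine : Int) (endPointOffset : Int) (arrCodes : List String) : Decidable (Pre_getTerminalValue startPointLine startPointOffset endPointLine endPointOffset arrCodes) := by unfold Pre_getTerminalValue; infer_instance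

def pvWitness_getTerminalValue : Int × Int × Int × Int × List String := (0, 1, 2, 2, ["abc", "de", "fgh"])

def Spec_getTerminalValue (startPointLine : Int) (startPointOffset : Int) (endPointLine : Int) (endPointOffset : Int) (arrCodes : List String) (out : String) : Prop := out = getTerminalValue_alt startPointLine startPointOffset endPointLine endPointOffset arrCodes
instance (startPointLine : Int) (startPointOffset : Int) (endPointLine : Int) (endPointOffset : Int) (arrCodes : List String) (out : String) : Decidable (Spec_getTerminalValue startPointLine startPointOffset endPointLine endPointOffset arrCodes out) := by unfold Spec_getTerminalValue; infer_instance

-- ===== CLAIM (what is proved, stated in full; the proofs are below) =====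
def Claim_equal_getTerminalValue : Prop := ∀ (startPointLine : Int) (startPointOffset : Int) (endPointLine : Int) (endPointOffset : Int) (arrCodes : List String), Dom_getTerminalValue startPointLine startPointOffset endPointLine endPointOffset arrCodes → Pre_getTerminalValue startPointLine startPointOffset endPointLine endPointOffset arrCodes → Spec_getTerminalValue startPointLine startPointOffset endPointLine endPointOffset arrCodes (getTerminalValue startPointLine startPointOffset endPointLine endPointOffset arrCodes)

-- ===== LEMMAS AND PROOFS =====

-- proof-only helper: "replace the last element by its end-trimmed copy" (the shape A's loop builds)
def pvTrimLast (eo : Int) : List String → List String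
  | [] => []
  | [x] => [PySem.Str.slice x none (some eo)]
  | x :: y :: t => x :: pvTrimLast eo (y :: t)

-- B's _clamp is exactly PySem's slice-bound clamping
theorem pvClamp_eq (off : Int) (n : Nat) : pvClamp off (n : Int) = ((PySem.List.clampIdx n off : Nat) : Int) := by
  unfold pvClamp PySem.List.clampIdx
  simp only [min_def, max_def]
  split_ifs <;> omega

-- xs[:b] is a clamped take (unfolding the primitive; no named lemma covers a possibly negative b)
theorem pvSliceTo {α : Type} (xs : List α) (b : Int) :
    PySem.List.slice xs none (some b) = xs.take (PySem.List.clampIdx xs.length b) := by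
  simp [PySem.List.slice, PySem.List.clampIdx]

theorem pvJoinConsNe (sep x : List Char) (l : List (List Char)) (h : l ≠ []) :
    PySem.Chars.join sep (x :: l) = x ++ sep ++ PySem.Chars.join sep l := by
  cases l with
  | nil => exact absurd rfl h
  | cons y t => exact PySem.Chars.join_cons_cons sep x y t

theorem pvLastLenLe (sep : List Char) : ∀ (T : List (List Char)) (last : List Char),
    last.length ≤ (PySem.Chars.join sep (T ++ [last])).length := by
  intro T
  induction T with
  | nil => intro last; simp [PySem.Chars.join_singleton]
  | cons x T ih =>
    intro last
    rw [List.cons_append, pvJoinConsNe sep x (T ++ [last]) (by simp)]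
    simp only [List.length_append]
    have := ih last
    omega

-- trimming the last piece before joining = taking a prefix of the untrimmed join
theorem pvTakeJoin (sep : List Char) : ∀ (T : List (List Char)) (last : List Char) (q : Nat), q ≤ last.length →
    PySem.Chars.join sep (T ++ [last.take q]) =
      (PySem.Chars.join sep (T ++ [last])).take ((PySem.Chars.join sep (T ++ [last])).length - last.length + q) := by
  intro T
  induction T with
  | nil =>
    intro last q hq
    simp [PySem.Chars.join_singleton]
  | cons x T ih =>
    intro last q hq
    rw [List.cons_append, List.cons_append,
      pvJoinConsNe sep x (T ++ [last.take q]) (by simp),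
      pvJoinConsNe sep x (T ++ [last]) (by simp), ih last q hq]
    have hll := pvLastLenLe sep T last
    set J := PySem.Chars.join sep (T ++ [last]) with hJ
    have harith : (x ++ sep ++ J).length - last.length + q
        = (x ++ sep).length + (J.length - last.length + q) := by
      simp only [List.length_append]
      omega
    rw [harith, List.append_assoc, List.take_length_add_append, ← List.append_assoc]

-- chars level: a bulk slice of the joined pieces = join of the endpoint-trimmed pieces
theorem pvJoinSliceChars (sep H L : List Char) (Tm : List (List Char)) (p q : Nat)
    (hp : p ≤ H.length) (hq : q ≤ L.length) :
    PySem.List.slice (PySem.Chars.join sep (H :: (Tm ++ [L]))) (some ((p : Nat) : Int))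
        (some (((PySem.Chars.join sep (H :: (Tm ++ [L]))).length : Int) - (L.length : Int) + ((q : Nat) : Int)))
      = PySem.Chars.join sep (H.drop p :: (Tm ++ [L.take q])) := by
  have hLJ : L.length ≤ (PySem.Chars.join sep (H :: (Tm ++ [L]))).length := by
    rw [show H :: (Tm ++ [L]) = (H :: Tm) ++ [L] by simp]
    exact pvLastLenLe sep (H :: Tm) L
  have hhi : ((PySem.Chars.join sep (H :: (Tm ++ [L]))).length : Int) - (L.length : Int) + ((q : Nat) : Int)
      = (((PySem.Chars.join sep (H :: (Tm ++ [L]))).length - L.length + q : Nat) : Int) := by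
    omega
  rw [hhi, pvJoinConsNe sep H (Tm ++ [L]) (by simp),
    pvJoinConsNe sep (H.drop p) (Tm ++ [L.take q]) (by simp),
    pvTakeJoin sep Tm L q hq, PySem.List.slice_natCast]
  have hLR : L.length ≤ (PySem.Chars.join sep (Tm ++ [L])).length := pvLastLenLe sep Tm L
  rw [List.append_assoc, List.drop_append_of_le_length hp]
  have harith : (H ++ (sep ++ PySem.Chars.join sep (Tm ++ [L]))).length - L.length + q - p
      = (H.drop p).length + (sep.length + ((PySem.Chars.join sep (Tm ++ [L])).length - L.length + q)) := by
    simp only [List.length_append, List.length_drop]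
    omega
  rw [harith, List.take_length_add_append, List.take_length_add_append, ← List.append_assoc]

-- the heart of the equivalence, at string level
theorem pvJoinSlice (so eo : Int) (h last : String) (M : List String) :
    PySem.Str.slice (PySem.Str.join "\n" (h :: M ++ [last]))
        (some (pvClamp so (PySem.Str.len h)))
        (some (PySem.Str.len (PySem.Str.join "\n" (h :: M ++ [last])) - PySem.Str.len last
               + pvClamp eo (PySem.Str.len last))) =
      PySem.Str.join "\n" (PySem.Str.slice h (some so) none :: M ++ [PySem.Str.slice last none (some eo)]) := by
  apply String.toList_inj.mp
  simp only [PySem.Str.toList_slice, PySem.Chars.slice_eq_listSlice, PySem.Str.toList_join,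
    PySem.Str.len_eq, List.map_cons, List.map_append, List.map_nil]
  rw [pvClamp_eq so h.toList.length, pvClamp_eq eo last.toList.length,
    PySem.List.slice_some_none, pvSliceTo last.toList eo]
  exact pvJoinSliceChars "\n".toList h.toList last.toList (List.map String.toList M)
    (PySem.List.clampIdx h.toList.length so) (PySem.List.clampIdx last.toList.length eo)
    (PySem.List.clampIdx_le _ _) (PySem.List.clampIdx_le _ _)

-- unfolding step of pvTrimLast past a kept head
theorem pvTrimLast_cons (eo : Int) (x : String) (l : List String) (h : l ≠ []) :
    pvTrimLast eo (x :: l) = x :: pvTrimLast eo l := by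
  cases l with
  | nil => exact absurd rfl h
  | cons y t => rfl

-- A's loop list: replace the last element of the slice by its trimmed copy
theorem pvTrimLast_concat (eo : Int) : ∀ (M : List String) (x : String),
    pvTrimLast eo (M ++ [x]) = M ++ [PySem.Str.slice x none (some eo)] := by
  intro M
  induction M with
  | nil => intro x; rfl
  | cons y M ih =>
    intro x
    rw [List.cons_append, pvTrimLast_cons eo y (M ++ [x]) (by simp), ih, List.cons_append]

-- the common middle-and-tail segment: A's plain-copy/trim-end lines equal B's trimmed slice tail
theorem pvMid (arr : List String) (eo : Int) : ∀ (k i b : Nat), b - i ≤ k → i ≤ b → b < arr.length →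
    pvTrimLast eo ((arr.drop i).take (b + 1 - i)) =
      (PySem.List.pyRange (i : Int) (b : Int) 1).map (fun j => (PySem.List.pyGet? arr j).getD "") ++
        [PySem.Str.slice ((PySem.List.pyGet? arr (b : Int)).getD "") none (some eo)] := by
  intro k
  induction k with
  | zero =>
    intro i b hk hib hb
    have hib' : i = b := by omega
    subst hib'
    have hi : i < arr.length := hb
    have h1 : i + 1 - i = 1 := by omega
    have htake : (arr.drop i).take 1 = [arr[i]] := by
      rw [List.take_one_drop_eq_of_lt_length hi]; rfl
    rw [h1, htake, PySem.List.pyRange_one_eq_nil (le_refl ((i : Int)))]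
    simp [pvTrimLast, PySem.List.pyGet?_natCast, List.getElem?_eq_getElem hi]
  | succ k ih =>
    intro i b hk hib hb
    by_cases hib' : i = b
    · subst hib'
      have hi : i < arr.length := hb
      have h1 : i + 1 - i = 1 := by omega
      have htake : (arr.drop i).take 1 = [arr[i]] := by
        rw [List.take_one_drop_eq_of_lt_length hi]; rfl
      rw [h1, htake, PySem.List.pyRange_one_eq_nil (le_refl ((i : Int)))]
      simp [pvTrimLast, PySem.List.pyGet?_natCast, List.getElem?_eq_getElem hi]
    · have hilt : i < b := by omega
      have hi : i < arr.length := by omega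
      rw [List.drop_eq_getElem_cons hi]
      have h1 : b + 1 - i = (b + 1 - (i + 1)) + 1 := by omega
      rw [h1, List.take_succ_cons]
      have hrest := ih (i + 1) b (by omega) (by omega) hb
      have hne : (arr.drop (i + 1)).take (b + 1 - (i + 1)) ≠ [] := by
        intro hcon
        have hlen := congrArg List.length hcon
        simp [List.length_take, List.length_drop] at hlen
        omega
      rw [pvTrimLast_cons eo _ _ hne, hrest]
      have hcast : ((i : Int)) < (b : Int) := by exact_mod_cast hilt
      rw [PySem.List.pyRange_one_cons hcast]
      have hc1 : ((i : Int)) + 1 = ((i + 1 : Nat) : Int) := by push_cast; ring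
      rw [hc1, List.map_cons]
      simp [PySem.List.pyGet?_natCast, List.getElem?_eq_getElem hi]

-- tail of A's map: split off the last index b; the i = startLine branch is dead past the head
theorem pvAMid (arr : List String) (so eo : Int) (a b : Nat) :
    ∀ (k i : Nat), b - i ≤ k → a < i → i ≤ b →
    (PySem.List.pyRange (i : Int) ((b + 1 : Nat) : Int) 1).map (fun j =>
      if j = (a : Int) then PySem.Str.slice ((PySem.List.pyGet? arr j).getD "") (some so) none
      else if j = (b : Int) then PySem.Str.slice ((PySem.List.pyGet? arr j).getD "") none (some eo)
      else (PySem.List.pyGet? arr j).getD "") =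
    (PySem.List.pyRange (i : Int) ((b : Nat) : Int) 1).map
      (fun j => (PySem.List.pyGet? arr j).getD "") ++
    [PySem.Str.slice ((PySem.List.pyGet? arr ((b : Nat) : Int)).getD "") none (some eo)] := by
  intro k
  induction k with
  | zero =>
    intro i hk hai hib
    have hieq : i = b := by omega
    subst hieq
    have hlt : ((i : Int)) < ((i + 1 : Nat) : Int) := by push_cast; omega
    have hnil1 : PySem.List.pyRange ((i : Int) + 1) ((i + 1 : Nat) : Int) 1 = [] :=
      PySem.List.pyRange_one_eq_nil (show ((i + 1 : Nat) : Int) ≤ (i : Int) + 1 by push_cast; omega)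
    rw [PySem.List.pyRange_one_cons hlt, hnil1,
      PySem.List.pyRange_one_eq_nil (le_refl ((i : Int)))]
    have hia : ¬ ((i : Int) = (a : Int)) := by
      intro hcon
      exact absurd ((Int.natCast_inj).mp hcon).symm (by omega)
    simp [hia]
  | succ k ih =>
    intro i hk hai hib
    by_cases hib' : i = b
    · subst hib'
      have hlt : ((i : Int)) < ((i + 1 : Nat) : Int) := by push_cast; omega
      have hnil1 : PySem.List.pyRange ((i : Int) + 1) ((i + 1 : Nat) : Int) 1 = [] :=
        PySem.List.pyRange_one_eq_nil (show ((i + 1 : Nat) : Int) ≤ (i : Int) + 1 by push_cast; omega)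
      rw [PySem.List.pyRange_one_cons hlt, hnil1,
        PySem.List.pyRange_one_eq_nil (le_refl ((i : Int)))]
      have hia : ¬ ((i : Int) = (a : Int)) := by
        intro hcon
        exact absurd ((Int.natCast_inj).mp hcon).symm (by omega)
      simp [hia]
    · have hlt1 : ((i : Int)) < ((b + 1 : Nat) : Int) := by push_cast; omega
      have hlt2 : ((i : Int)) < ((b : Nat) : Int) := by omega
      rw [PySem.List.pyRange_one_cons hlt1, PySem.List.pyRange_one_cons hlt2,
        List.map_cons, List.map_cons]
      have hc : ((i : Int)) + 1 = ((i + 1 : Nat) : Int) := by push_cast; ring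
      rw [hc, ih (i + 1) (by omega) (by omega) (by omega)]
      have hia : ¬ ((i : Int) = (a : Int)) := by
        intro hcon
        exact absurd ((Int.natCast_inj).mp hcon).symm (by omega)
      have hibn : ¬ ((i : Int) = (b : Int)) := by
        intro hcon
        exact absurd ((Int.natCast_inj).mp hcon) hib'
      simp [hia, hibn]

-- A's loop list equals the head-trimmed first line followed by the end-trimmed remaining slice
theorem pvLists (arr : List String) (so eo : Int) (a b : Nat) (hab : a < b) (hb : b < arr.length) :
    (PySem.List.pyRange (a : Int) ((b : Int) + 1) 1).foldl (fun acc i =>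
        if i = (a : Int) then
          acc ++ [PySem.Str.slice ((PySem.List.pyGet? arr i).getD "") (some so) none]
        else if i = (b : Int) then
          acc ++ [PySem.Str.slice ((PySem.List.pyGet? arr i).getD "") none (some eo)]
        else
          acc ++ [(PySem.List.pyGet? arr i).getD ""]) [] =
      (PySem.Str.slice (arr[a]'(by omega) : String) (some so) none) ::
        pvTrimLast eo ((arr.drop (a + 1)).take (b - a)) := by
  have hcongr := PySem.List.foldl_congr_mem
    (l := PySem.List.pyRange (a : Int) ((b : Int) + 1) 1)
    (init := ([] : List String))
    (f := fun acc i =>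
        if i = (a : Int) then
          acc ++ [PySem.Str.slice ((PySem.List.pyGet? arr i).getD "") (some so) none]
        else if i = (b : Int) then
          acc ++ [PySem.Str.slice ((PySem.List.pyGet? arr i).getD "") none (some eo)]
        else
          acc ++ [(PySem.List.pyGet? arr i).getD ""])
    (g := fun acc i => acc ++ [
        if i = (a : Int) then PySem.Str.slice ((PySem.List.pyGet? arr i).getD "") (some so) none
        else if i = (b : Int) then PySem.Str.slice ((PySem.List.pyGet? arr i).getD "") none (some eo)
        else (PySem.List.pyGet? arr i).getD ""])
    (by intro acc x _; dsimp only; split_ifs <;> rfl)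
  rw [hcongr, PySem.List.foldl_append_singleton_eq_map, List.nil_append]
  have hcast : ((a : Int)) < (b : Int) + 1 := by
    have : ((a : Int)) < (b : Int) := by exact_mod_cast hab
    omega
  rw [PySem.List.pyRange_one_cons hcast, List.map_cons, if_pos rfl]
  have hc1 : ((a : Int)) + 1 = ((a + 1 : Nat) : Int) := by push_cast; ring
  have hc2 : ((b : Int)) + 1 = ((b + 1 : Nat) : Int) := by push_cast; ring
  have hmid := pvMid arr eo (b - (a + 1)) (a + 1) b (le_refl _) (by omega) hb
  have hm1 : b + 1 - (a + 1) = b - a := by omega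
  rw [hm1] at hmid
  rw [hmid]
  congr 1
  · simp [PySem.List.pyGet?_natCast, List.getElem?_eq_getElem (show a < arr.length by omega)]
  · rw [hc1, hc2]
    exact pvAMid arr so eo a b (b - (a + 1)) (a + 1) (le_refl _) (by omega) (by omega)

-- xs[0] on a nonempty list is its head
theorem pvGetZero (x : String) (l : List String) : (PySem.List.pyGet? (x :: l) 0).getD "" = x := by
  simp [PySem.List.pyGet?, PySem.List.pyIdx?]

-- ===== VERDICT (by name: the statement is the Claim_ definition above) =====
theorem getTerminalValue_spec : Claim_equal_getTerminalValue := by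
  unfold Claim_equal_getTerminalValue
  intro s so e eo arr _ hpre
  unfold Spec_getTerminalValue getTerminalValue getTerminalValue_alt Pre_getTerminalValue at *
  by_cases hse : s = e
  · simp [hse]
  · rw [if_neg hse] at hpre ⊢
    rw [if_neg hse]
    by_cases hlt : e < s
    · -- empty range: A's loop runs zero times, B returns '' at its explicit guard
      rw [if_pos hlt, PySem.List.pyRange_one_eq_nil (show e + 1 ≤ s by omega)]
      rfl
    · obtain ⟨hs0, helt⟩ : 0 ≤ s ∧ e < (arr.length : Int) := hpre.resolve_left hlt
      have hselt : s < e := by omega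
      rw [if_neg (show ¬ e < s by omega)]
      dsimp only
      obtain ⟨a, rfl⟩ : ∃ a : Nat, s = (a : Int) := ⟨s.toNat, (Int.toNat_of_nonneg hs0).symm⟩
      obtain ⟨b, rfl⟩ : ∃ b : Nat, e = (b : Int) := ⟨e.toNat, (Int.toNat_of_nonneg (by omega)).symm⟩
      have hab : a < b := by exact_mod_cast hselt
      have hb : b < arr.length := by exact_mod_cast helt
      rw [pvLists arr so eo a b hab hb]
      -- name the pieces of the selected range
      have hchunk : PySem.List.slice arr (some ((a : Nat) : Int)) (some (((b : Nat) : Int) + 1))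
          = arr[a]'(by omega) :: ((arr.drop (a + 1)).take ((b - a - 1)) ++ [arr[b]'hb]) := by
        rw [PySem.List.slice_toNat arr (show (0:Int) ≤ (a : Int) by omega) (show (0:Int) ≤ (b : Int) + 1 by omega)]
        have ht1 : ((a : Int)).toNat = a := by omega
        have ht2 : (((b : Int)) + 1).toNat = b + 1 := by omega
        rw [ht1, ht2, List.drop_eq_getElem_cons (show a < arr.length by omega)]
        have h1 : b + 1 - a = (b - a) + 1 := by omega
        rw [h1, List.take_succ_cons]
        congr 1
        have h2 : b - a = (b - a - 1) + 1 := by omega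
        rw [h2, List.take_succ]
        congr 1
        have hget : (arr.drop (a + 1))[b - a - 1]? = some (arr[b]'hb) := by
          rw [List.getElem?_drop]
          have h3 : a + 1 + (b - a - 1) = b := by omega
          rw [h3, List.getElem?_eq_getElem hb]
        rw [hget]
        rfl
      have hT : (arr.drop (a + 1)).take (b - a)
          = (arr.drop (a + 1)).take (b - a - 1) ++ [arr[b]'hb] := by
        have h2 : b - a = (b - a - 1) + 1 := by omega
        rw [h2, List.take_succ]
        congr 1
        have hget : (arr.drop (a + 1))[b - a - 1]? = some (arr[b]'hb) := by
          rw [List.getElem?_drop]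
          have h3 : a + 1 + (b - a - 1) = b := by omega
          rw [h3, List.getElem?_eq_getElem hb]
        rw [hget]
        rfl
      rw [hT, pvTrimLast_concat, hchunk]
      -- first and last element of the chunk
      have hfirst : (PySem.List.pyGet? (arr[a]'(by omega) :: ((arr.drop (a + 1)).take ((b - a - 1)) ++ [arr[b]'hb])) 0).getD ""
          = arr[a]'(by omega) := pvGetZero _ _
      have hlast : (PySem.List.pyGet? (arr[a]'(by omega) :: ((arr.drop (a + 1)).take ((b - a - 1)) ++ [arr[b]'hb])) (-1)).getD ""
          = arr[b]'hb := by
        rw [PySem.List.pyGet?_neg_one]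
        rw [show (arr[a]'(by omega) :: ((arr.drop (a + 1)).take ((b - a - 1)) ++ [arr[b]'hb]))
            = (arr[a]'(by omega) :: (arr.drop (a + 1)).take ((b - a - 1))) ++ [arr[b]'hb] by simp]
        rw [List.getLast?_concat]
        rfl
      rw [hfirst, hlast]
      exact (pvJoinSlice so eo (arr[a]'(by omega)) (arr[b]'hb) ((arr.drop (a + 1)).take (b - a - 1))).symm
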